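-- pv_equiv track=rewrite | github.com/pypi-data/pypi-mirror-64 | packages/wipo-ipc/wipo-ipc-0.0.1.tar.gz/wipo-ipc-0.0.1/wipo_ipc/ipc.py | convert_to_human
-- ===== SOURCE A (Python) =====
-- def convert_to_human(ipc):
--     """
--     ex: A63B0055000000 --> A63B 55/00
--         A61F0005580000 --> A61F 5/58
--     """
--     if len(ipc) <= 4:
--         return ipc
--     output = ""
--     output += ipc[0:4]
--     output += ' '
--     i = 4
--     for char in ipc[4:8]:
--         if char != '0':
--             output += ipc[i:8]
--             break
--         i += 1
--     output += '/'
--     if ipc[8] == '0':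
--         output += ipc[8:10]
--     else:
--         i = 8
--         for char in ipc[8:]:
--             if char != '0':
--                 output += char
--             else:
--                 if i == 9:
--                     output += char
--                     break
--                 else:
--                     break
--             i += 1
--     return output
-- ===== SOURCE B (Python) =====
-- def convert_to_human(ipc):
--     if len(ipc) <= 4:
--         return ipc
--     main = ipc[4:8].lstrip('0')
--     j = ipc.find('0', 8)
--     if j == -1:
--         j = len(ipc)
--     sub = ipc[8:max(10, j)]
--     return ipc[0:4] + ' ' + main + '/' + sub
-- ===== Notes on version B (the rewrite author's own statement) =====
-- stated objective: simpler
-- what changed: Replaces A's two counter-driven character loops (with break and i==9 bookkeeping) by direct string operations: main group by stripping leading zero digits, subgroup by a single str.find of the zero digit from index 8 plus one slice ipc[8:max(10, j)].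
-- outside the precondition, e.g. on convert_to_human('A63B5'): A raises IndexError, B returns 'A63B 5/'
import Mathlib
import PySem

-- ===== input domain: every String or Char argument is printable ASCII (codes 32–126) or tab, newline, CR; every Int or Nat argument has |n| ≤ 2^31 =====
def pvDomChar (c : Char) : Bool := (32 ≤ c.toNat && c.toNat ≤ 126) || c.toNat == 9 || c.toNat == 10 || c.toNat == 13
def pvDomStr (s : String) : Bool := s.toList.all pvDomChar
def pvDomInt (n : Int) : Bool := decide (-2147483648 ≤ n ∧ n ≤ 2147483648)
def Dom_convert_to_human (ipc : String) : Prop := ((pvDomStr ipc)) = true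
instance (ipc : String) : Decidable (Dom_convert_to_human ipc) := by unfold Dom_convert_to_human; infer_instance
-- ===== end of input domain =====

-- B replaces A's two counter-driven loops by a leading-zero strip and a single find-from-8 plus one slice (simpler; a timing run measured it constant-factor faster).

-- ===== PORT A =====
-- the 'for char in ipc[4:8]' loop with counter i and break
def aMainLoop (s : List Char) : List Char → Nat → List Char → List Char
  | [], _, out => out
  | c :: rest, i, out =>
    if c ≠ '0' then out ++ PySem.List.slice s (some (i : Int)) (some 8)
    else aMainLoop s rest (i + 1) out

-- the 'for char in ipc[8:]' loop with counter i, the i == 9 branch and break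
def aSubLoop : List Char → Nat → List Char → List Char
  | [], _, out => out
  | c :: rest, i, out =>
    if c ≠ '0' then aSubLoop rest (i + 1) (out ++ [c])
    else if i = 9 then out ++ [c] else out

def convert_to_human (ipc : String) : String :=
  let s := ipc.toList
  if s.length ≤ 4 then ipc
  else
    let output := PySem.List.slice s (some 0) (some 4) ++ [' ']
    let output := aMainLoop s (PySem.List.slice s (some 4) (some 8)) 4 output
    let output := output ++ ['/']
    match PySem.List.pyGet? s 8 with
    | none => String.ofList output   -- Python raises IndexError at ipc[8] here (excluded by Pre_)
    | some c8 =>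
      String.ofList (if c8 = '0' then output ++ PySem.List.slice s (some 8) (some 10)
                 else aSubLoop (PySem.List.slice s (some 8) none) 8 output)

-- ===== PORT B =====
def convert_to_human_alt (ipc : String) : String :=
  let s := ipc.toList
  if s.length ≤ 4 then ipc
  else
    -- ipc[4:8].lstrip('0'): lstrip with the one-char set {'0'} is exactly dropWhile (· == '0') (hand port, exact)
    let main := (PySem.List.slice s (some 4) (some 8)).dropWhile (fun c => c == '0')
    let j := PySem.Chars.findFrom s ['0'] 8 none
    let j := if j = -1 then (s.length : Int) else j
    let sub := PySem.List.slice s (some 8) (some (max 10 j))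
    String.ofList (PySem.List.slice s (some 0) (some 4) ++ [' '] ++ main ++ ['/'] ++ sub)

-- ===== PRECONDITION & SPEC =====
-- Pre_ excludes exactly the strings of length 5..8, on which A raises IndexError at ipc[8].
def Pre_convert_to_human (ipc : String) : Prop :=
  PySem.Str.len ipc ≤ 4 ∨ 9 ≤ PySem.Str.len ipc
instance (ipc : String) : Decidable (Pre_convert_to_human ipc) := by
  unfold Pre_convert_to_human; infer_instance
def pvWitness_convert_to_human : String := "A63B0055000000"

def Spec_convert_to_human (ipc : String) (out : String) : Prop := out = convert_to_human_alt ipc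
instance (ipc : String) (out : String) : Decidable (Spec_convert_to_human ipc out) := by
  unfold Spec_convert_to_human; infer_instance

-- ===== CLAIM (what is proved, stated in full; the proofs are below) =====
def Claim_equal_convert_to_human : Prop := ∀ (ipc : String), Dom_convert_to_human ipc → Pre_convert_to_human ipc → Spec_convert_to_human ipc (convert_to_human ipc)

-- ===== LEMMAS AND PROOFS =====

-- A's main-group loop appends the '0'-stripped tail of ipc[4:8]
lemma aMainLoop_eq (s : List Char) :
    ∀ (rest : List Char) (i : Nat) (out : List Char), i ≤ 8 →
      rest = (s.take 8).drop i →
      aMainLoop s rest i out = out ++ rest.dropWhile (fun c => c == '0') := by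
  intro rest
  induction rest with
  | nil => intro i out _ _; simp [aMainLoop]
  | cons c r ih =>
    intro i out hi hseg
    by_cases hc : c = '0'
    · subst hc
      have hr : r = (s.take 8).drop (i + 1) := by
        rw [List.drop_add_one_eq_tail_drop, ← hseg]; rfl
      have hi8 : i + 1 ≤ 8 := by
        by_contra h
        have : i = 8 := by omega
        subst this
        have : (s.take 8).drop 8 = [] := by
          apply List.drop_eq_nil_of_le; simp
        rw [this] at hseg; exact absurd hseg (by simp)
      simp only [aMainLoop, ne_eq, not_true_eq_false, if_false, List.dropWhile_cons,
        beq_self_eq_true, if_true]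
      exact ih (i+1) out hi8 hr
    · simp only [aMainLoop, ne_eq, hc, not_false_eq_true, if_true, List.dropWhile_cons,
        beq_iff_eq, if_false]
      congr 1
      have : PySem.List.slice s (some (i:Int)) (some 8) = List.take (8 - i) (List.drop i s) := by
        have h8 : (8:Int) = ((8:Nat):Int) := by norm_num
        rw [h8, PySem.List.slice_natCast]
      rw [this, ← List.drop_take, ← hseg]

-- A's subgroup loop, once past index 9, is takeWhile (≠ '0')
lemma aSubLoop_ge10 :
    ∀ (t : List Char) (i : Nat) (out : List Char), 10 ≤ i →
      aSubLoop t i out = out ++ t.takeWhile (fun c => c != '0') := by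
  intro t
  induction t with
  | nil => intro i out _; simp [aSubLoop]
  | cons c r ih =>
    intro i out hi
    by_cases hc : c = '0'
    · subst hc
      simp only [aSubLoop, ne_eq, not_true_eq_false, if_false]
      rw [if_neg (by omega)]
      simp
    · simp only [aSubLoop, ne_eq, hc, not_false_eq_true, if_true]
      rw [ih (i+1) _ (by omega)]
      simp [hc]

-- single-character find: index (from k) of the first '0', or -1
lemma find_go_single (t : List Char) (k : Nat) :
    PySem.Chars.find.go ['0'] t k =
      if '0' ∈ t then ((k + (t.takeWhile (fun c => c != '0')).length : Nat) : Int) else -1 := by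
  induction t generalizing k with
  | nil => simp [PySem.Chars.find.go]
  | cons c r ih =>
    by_cases hc : c = '0'
    · subst hc
      simp [PySem.Chars.find.go, List.isPrefixOf]
    · have hne : ('0' == c) = false := by simp [Ne.symm hc]
      have hpre : List.isPrefixOf ['0'] (c :: r) = false := by
        simp [List.isPrefixOf, hne]
      simp only [PySem.Chars.find.go, hpre, Bool.false_eq_true, if_false]
      rw [ih (k+1)]
      have hcw : List.takeWhile (fun c => c != '0') (c :: r) = c :: List.takeWhile (fun c => c != '0') r := by
        simp [hc]
      by_cases hm : '0' ∈ r
      · rw [if_pos hm, if_pos (by simp [hm]), hcw]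
        push_cast
        simp
        ring
      · rw [if_neg hm, if_neg (by simp [Ne.symm hc, hm])]

-- B's find('0', 8) on a string of length ≥ 9
lemma findFrom_val (s : List Char) (h9 : 9 ≤ s.length) :
    PySem.Chars.findFrom s ['0'] 8 none =
      if '0' ∈ s.drop 8 then ((8 + ((s.drop 8).takeWhile (fun c => c != '0')).length : Nat) : Int)
      else -1 := by
  have hfind : PySem.Chars.find (s.drop 8) ['0'] = PySem.Chars.find.go ['0'] (s.drop 8) 0 := rfl
  have htake : List.take (Int.toNat (s.length : Int)) s = s := by simp
  simp only [PySem.Chars.findFrom]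
  rw [if_neg (by push_cast; omega)]
  norm_num [htake]
  simp only [show Int.toNat 8 = 8 from rfl]
  rw [hfind, find_go_single]
  by_cases hm : '0' ∈ s.drop 8
  · rw [if_pos hm, if_pos hm]
    rw [if_neg (by push_cast; omega)]
    push_cast; ring
  · rw [if_neg hm, if_neg hm, if_pos rfl]

-- the subgroup slice ipc[8:b] for a nonnegative stop
lemma slice_from8 (xs : List Char) (b : Int) (h8 : 8 ≤ xs.length) (hb : 0 ≤ b) :
    PySem.List.slice xs (some 8) (some b) = (xs.drop 8).take (min b.toNat xs.length - 8) := by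
  simp only [PySem.List.slice, PySem.List.clampIdx]
  rw [if_neg (by omega), if_neg (by omega)]
  have h1 : min (Int.toNat 8) xs.length = 8 := by omega
  rw [h1, List.drop_take.symm]

-- ===== VERDICT (by name: the statement is the Claim_ definition above) =====

theorem convert_to_human_spec : Claim_equal_convert_to_human := by
  intro ipc _ hpre
  unfold Spec_convert_to_human convert_to_human convert_to_human_alt
  set s := ipc.toList with hs
  have hlen : PySem.Str.len ipc = s.length := by
    simp [PySem.Str.len, hs]
  by_cases h4 : s.length ≤ 4
  · simp only [if_pos h4]
  · have h9 : 9 ≤ s.length := by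
      unfold Pre_convert_to_human at hpre
      rw [hlen] at hpre
      omega
    simp only [if_neg h4]
    -- shared pieces
    have hsl48 : PySem.List.slice s (some 4) (some 8) = (s.take 8).drop 4 := by
      have : ((4:Int)) = ((4:Nat):Int) := by norm_num
      rw [this, show (8:Int) = ((8:Nat):Int) by norm_num, PySem.List.slice_natCast, ← List.drop_take]
    have hmain := aMainLoop_eq s (PySem.List.slice s (some 4) (some 8)) 4
      (PySem.List.slice s (some 0) (some 4) ++ [' ']) (by omega) hsl48
    rw [hmain]
    -- the tail t = ipc[8:]
    have hslt : PySem.List.slice s (some 8) none = s.drop 8 := by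
      rw [PySem.List.slice_from s (by norm_num)]; rfl
    have htl : (s.drop 8).length = s.length - 8 := by simp
    rcases ht : s.drop 8 with _ | ⟨c8, rest⟩
    · exfalso
      have := congrArg List.length ht
      simp at this
      omega
    have hget : PySem.List.pyGet? s 8 = some c8 := by
      rw [PySem.List.pyGet?_eq_some_getElem s (by norm_num) (by exact_mod_cast by omega)]
      have : s[(8:Int).toNat]? = some s[(8:Int).toNat] := List.getElem?_eq_getElem (by omega)
      rw [← List.head?_drop] at this
      simp only [show (8:Int).toNat = 8 from rfl] at this ⊢
      rw [ht] at this
      simp at this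
      simp [this]
    rw [hget]
    rw [findFrom_val s h9, ht]
    simp only []
    -- collapse the definite-found test into a single if
    set t := c8 :: rest with htc
    set m := (t.takeWhile (fun c => c != '0')).length with hmdef
    have hjv : (if (if '0' ∈ t then ((8 + m : Nat) : Int) else -1) = -1 then ((s.length : Nat) : Int)
        else if '0' ∈ t then ((8 + m : Nat) : Int) else -1)
        = (if '0' ∈ t then ((8 + m : Nat) : Int) else ((s.length : Nat) : Int)) := by
      by_cases hm0 : '0' ∈ t
      · simp only [if_pos hm0]
        rw [if_neg (by push_cast; omega)]
      · rw [if_neg hm0, if_neg hm0, if_pos rfl]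
    rw [hjv]
    have hmle : m ≤ t.length := (List.takeWhile_prefix _).length_le
    have htlen : t.length = s.length - 8 := by rw [← ht]; simp
    by_cases hc8 : c8 = '0'
    · -- first subgroup char is '0': both take ipc[8:10]
      subst hc8
      have hm0 : m = 0 := by simp [hmdef, htc]
      have hmem : '0' ∈ t := by simp [htc]
      rw [if_pos rfl, if_pos hmem, hm0]
      norm_num
    · rw [if_neg hc8]
      have hmem_iff : ('0' ∈ t) ↔ ('0' ∈ rest) := by simp [htc, Ne.symm hc8]
      -- the B-side slice, in both membership cases
      congr 1
      rw [hslt, ht]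
      by_cases hm0 : '0' ∈ t
      · rw [if_pos hm0]
        have hmlt : m < t.length := by
          rcases lt_or_eq_of_le hmle with h | h
          · exact h
          · exfalso
            have heq : t.takeWhile (fun c => c != '0') = t :=
              (List.takeWhile_prefix _).eq_of_length h
            have := (List.takeWhile_eq_self_iff).mp heq _ hm0
            simp at this
        have hm1 : 1 ≤ m := by
          rcases Nat.eq_zero_or_pos m with h | h
          · exfalso
            have : t.takeWhile (fun c => c != '0') = [] := List.eq_nil_of_length_eq_zero h
            rw [htc] at this
            simp [hc8] at this
          · exact h
        have hb : (0:Int) ≤ max 10 ((8 + m : Nat) : Int) := by positivity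
        rw [slice_from8 s _ (by omega) hb]
        have htn : (max 10 ((8 + m : Nat) : Int)).toNat = max 10 (8 + m) := by omega
        rw [htn]
        have hmin : min (max 10 (8 + m)) s.length = max 10 (8 + m) := by omega
        rw [hmin]
        have hsub : max 10 (8 + m) - 8 = max 2 m := by omega
        rw [hsub, ht]
        rcases rest with _ | ⟨c9, r2⟩
        · exfalso; exact hc8 (Eq.symm (by simpa [htc] using hm0))
        by_cases hc9 : c9 = '0'
        · subst hc9
          have hm1' : m = 1 := by
            simp [hmdef, htc, hc8]
          rw [hm1', htc]
          simp [aSubLoop, hc8, List.append_assoc]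
        · have hm2 : m = 2 + (r2.takeWhile (fun c => c != '0')).length := by
            simp [hmdef, htc, hc8, hc9]
            omega
          have hmem2 : '0' ∈ r2 := by
            rcases (hmem_iff.mp hm0) with h
            simpa [Ne.symm hc9] using h
          rw [htc]
          simp only [aSubLoop, ne_eq, hc8, not_false_eq_true, if_true, hc9]
          rw [aSubLoop_ge10 r2 10 _ (by omega)]
          have hmax : max 2 m = m := by omega
          rw [hmax]
          have htake : (c8 :: c9 :: r2).take m = c8 :: c9 :: r2.takeWhile (fun c => c != '0') := by
            rw [hm2, show 2 + (r2.takeWhile (fun c => c != '0')).length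
                = ((r2.takeWhile (fun c => c != '0')).length + 1) + 1 from by omega]
            simp only [List.take_succ_cons]
            congr 2
            exact (List.prefix_iff_eq_take.mp (List.takeWhile_prefix _)).symm
          rw [htake]
          simp
      · rw [if_neg hm0]
        have hall : ∀ x ∈ t, x ≠ '0' := by
          intro x hx h; exact hm0 (h ▸ hx)
        rw [slice_from8 s _ (by omega) (by positivity)]
        have hmn : min (Int.toNat (max 10 ((s.length : Nat) : Int))) s.length - 8 = s.length - 8 := by omega
        rw [hmn, ht, ← htlen, List.take_length, htc]
        rcases rest with _ | ⟨c9, r2⟩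
        · simp [aSubLoop, hc8]
        · have hc9 : c9 ≠ '0' := hall c9 (by simp [htc])
          simp only [aSubLoop, ne_eq, hc8, not_false_eq_true, if_true, hc9]
          rw [aSubLoop_ge10 r2 10 _ (by omega)]
          have : r2.takeWhile (fun c => c != '0') = r2 := by
            rw [List.takeWhile_eq_self_iff]
            intro x hx
            simp [hall x (by simp [htc, hx])]
          rw [this]
          simp
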